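-- pv_equiv track=rewrite | github.com/koikoi94/timeseries-anomaly-s6 | evaluate/affiliation.py | convert_vector_to_events
-- ===== SOURCE A (Python) =====
-- from itertools import groupby
-- from operator import itemgetter
--
-- def convert_vector_to_events(vector=None):
--     if vector is None:
--         vector = [0, 1, 1, 0, 0, 1, 0]
--     positive_indexes = [idx for idx, val in enumerate(vector) if val > 0]
--     events = []
--     for k, g in groupby(enumerate(positive_indexes), lambda ix: ix[0] - ix[1]):
--         cur_cut = list(map(itemgetter(1), g))
--         events.append((cur_cut[0], cur_cut[-1]))
--
--     events = [(x, y + 1) for (x, y) in events]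
--
--     return events
-- ===== SOURCE B (Python) =====
-- def convert_vector_to_events(vector=None):
--     if vector is None:
--         vector = [0, 1, 1, 0, 0, 1, 0]
--     events = []
--     in_run = False
--     start = 0
--     for idx, val in enumerate(vector):
--         if val > 0:
--             if not in_run:
--                 start = idx
--                 in_run = True
--         elif in_run:
--             events.append((start, idx))
--             in_run = False
--     if in_run:
--         events.append((start, len(vector)))
--     return events
-- ===== Notes on version B (the rewrite author's own statement) =====
-- stated objective: idiomatic
-- what changed: Replaces the positive-index list plus groupby-on-index-differences pipeline (and the final end+1 remap) with one direct scan over the vector that maintains an in_run flag and a run start, emitting each (start, end) interval as the run closes.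
import Mathlib
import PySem

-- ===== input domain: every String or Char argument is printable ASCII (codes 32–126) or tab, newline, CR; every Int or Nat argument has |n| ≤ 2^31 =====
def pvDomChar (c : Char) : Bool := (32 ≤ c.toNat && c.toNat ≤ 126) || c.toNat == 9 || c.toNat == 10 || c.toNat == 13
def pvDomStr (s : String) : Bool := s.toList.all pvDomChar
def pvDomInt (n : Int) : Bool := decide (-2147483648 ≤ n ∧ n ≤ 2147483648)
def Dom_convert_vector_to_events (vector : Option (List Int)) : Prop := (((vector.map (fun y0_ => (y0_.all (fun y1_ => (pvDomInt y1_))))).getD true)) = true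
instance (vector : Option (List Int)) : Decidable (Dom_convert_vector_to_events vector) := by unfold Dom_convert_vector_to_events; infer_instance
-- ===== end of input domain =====

-- B replaces A's positive-index list + groupby-on-index-difference pipeline with a single
-- direct scan keeping an in_run start; objective: more idiomatic / simpler. Return values only
-- (neither version mutates its argument).

-- ===== PORT A =====
-- itertools.groupby over the enumerated positive-index list, key ix[0] - ix[1]:
-- adjacent elements with equal key share a group.
def pyGroupbyA : List (Int × Int) → List (List (Int × Int))
  | [] => []
  | a :: rest =>
    match pyGroupbyA rest with
    | (b :: g) :: gs => if a.1 - a.2 = b.1 - b.2 then (a :: b :: g) :: gs else [a] :: (b :: g) :: gs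
    | gs => [a] :: gs

def convert_vector_to_events (vector : Option (List Int)) : List (Int × Int) :=
  let v := vector.getD [0, 1, 1, 0, 0, 1, 0]
  let positive_indexes := (PySem.List.enumerate v).filterMap (fun p => if p.2 > 0 then some p.1 else none)
  let events := (pyGroupbyA (PySem.List.enumerate positive_indexes)).map
    (fun g =>
      let cur_cut := g.map Prod.snd
      (cur_cut.headD 0, cur_cut.getLastD 0))
  events.map (fun p => (p.1, p.2 + 1))

-- ===== PORT B =====
-- single pass: start? = some s while inside a run that began at s, none otherwise
def scanRuns : List Int → Int → Option Int → List (Int × Int)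
  | [], i, start? =>
    match start? with
    | some s => [(s, i)]
    | none => []
  | x :: rest, i, start? =>
    if x > 0 then scanRuns rest (i + 1) (some (start?.getD i))
    else
      match start? with
      | some s => (s, i) :: scanRuns rest (i + 1) none
      | none => scanRuns rest (i + 1) none

def convert_vector_to_events_alt (vector : Option (List Int)) : List (Int × Int) :=
  scanRuns (vector.getD [0, 1, 1, 0, 0, 1, 0]) 0 none

-- ===== PRECONDITION & SPEC =====
def Spec_convert_vector_to_events (vector : Option (List Int)) (out : List (Int × Int)) : Prop := out = convert_vector_to_events_alt vector
instance (vector : Option (List Int)) (out : List (Int × Int)) : Decidable (Spec_convert_vector_to_events vector out) := by unfold Spec_convert_vector_to_events; infer_instance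

-- ===== CLAIM (what is proved, stated in full; the proofs are below) =====
def Claim_equal_convert_vector_to_events : Prop := ∀ (vector : Option (List Int)), Dom_convert_vector_to_events vector → Spec_convert_vector_to_events vector (convert_vector_to_events vector)

-- ===== LEMMAS AND PROOFS =====

-- proof-side semantic helpers
def posFrom (n : Int) : List Int → List Int
  | [] => []
  | x :: r => if x > 0 then n :: posFrom (n + 1) r else posFrom (n + 1) r

def groupRuns : List Int → List (List Int)
  | [] => []
  | a :: rest =>
    match groupRuns rest with
    | (b :: g) :: gs => if b = a + 1 then (a :: b :: g) :: gs else [a] :: (b :: g) :: gs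
    | gs => [a] :: gs

def Ev (rs : List (List Int)) : List (Int × Int) :=
  rs.map (fun h => (h.headD 0, h.getLastD 0 + 1))

def mergeHead (s n : Int) (gs : List (List Int)) : List (Int × Int) :=
  match gs with
  | (p :: g) :: gs' => if p = n then (s, g.getLastD p + 1) :: Ev gs' else (s, n) :: Ev gs
  | gs => (s, n) :: Ev gs

theorem posFrom_eq (v : List Int) : ∀ (n : Int),
    (PySem.List.enumerate v n).filterMap (fun p => if p.2 > 0 then some p.1 else none) = posFrom n v := by
  induction v with
  | nil => intro n; simp [PySem.List.enumerate_nil, posFrom]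
  | cons x r ih =>
    intro n
    simp only [PySem.List.enumerate_cons, List.filterMap_cons, posFrom]
    by_cases hx : x > 0 <;> simp [hx, ih (n + 1)]

theorem pyGroupbyA_shape (x : Int × Int) (l : List (Int × Int)) :
    ∃ g gs, pyGroupbyA (x :: l) = (x :: g) :: gs := by
  unfold pyGroupbyA
  rcases h : pyGroupbyA l with _ | ⟨_ | ⟨b, g⟩, gs⟩
  · exact ⟨[], [], rfl⟩
  · exact ⟨[], _, rfl⟩
  · by_cases hk : x.1 - x.2 = b.1 - b.2
    · exact ⟨b :: g, gs, by simp [hk]⟩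
    · exact ⟨[], (b :: g) :: gs, by simp [hk]⟩

theorem groupRuns_shape (a : Int) (l : List Int) :
    ∃ g gs, groupRuns (a :: l) = (a :: g) :: gs := by
  unfold groupRuns
  rcases h : groupRuns l with _ | ⟨_ | ⟨b, g⟩, gs⟩
  · exact ⟨[], [], rfl⟩
  · exact ⟨[], _, rfl⟩
  · by_cases hk : b = a + 1
    · exact ⟨b :: g, gs, by simp [hk]⟩
    · exact ⟨[], (b :: g) :: gs, by simp [hk]⟩

set_option maxRecDepth 8192 in
theorem groupby_eq_groupRuns (P : List Int) : ∀ (c : Int),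
    (pyGroupbyA (PySem.List.enumerate P c)).map (List.map Prod.snd) = groupRuns P := by
  induction P with
  | nil => intro c; simp [PySem.List.enumerate_nil, pyGroupbyA, groupRuns]
  | cons a P' ih =>
    intro c
    cases P' with
    | nil =>
      simp [PySem.List.enumerate_nil, PySem.List.enumerate_cons, pyGroupbyA, groupRuns]
    | cons b P'' =>
      obtain ⟨g, gs, hg⟩ := pyGroupbyA_shape ((c + 1 : Int), b) (PySem.List.enumerate P'' (c + 1 + 1))
      rw [show ((c + 1 : Int), b) :: PySem.List.enumerate P'' (c + 1 + 1)
            = PySem.List.enumerate (b :: P'') (c + 1) by rw [PySem.List.enumerate_cons]] at hg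
      obtain ⟨g₂, gs₂, hg₂⟩ := groupRuns_shape b P''
      have ihc := ih (c + 1)
      rw [hg, hg₂] at ihc
      simp only [List.map_cons, List.cons.injEq] at ihc
      obtain ⟨⟨_, hgg⟩, hgs⟩ := ihc
      rw [show PySem.List.enumerate (a :: b :: P'') c
            = ((c : Int), a) :: PySem.List.enumerate (b :: P'') (c + 1) by rw [PySem.List.enumerate_cons]]
      rw [show pyGroupbyA (((c : Int), a) :: PySem.List.enumerate (b :: P'') (c + 1))
            = (match pyGroupbyA (PySem.List.enumerate (b :: P'') (c + 1)) with
               | (b' :: g') :: gs' => if ((c : Int), a).1 - ((c : Int), a).2 = b'.1 - b'.2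
                   then (((c : Int), a) :: b' :: g') :: gs' else [((c : Int), a)] :: (b' :: g') :: gs'
               | gs' => [((c : Int), a)] :: gs') from rfl, hg]
      rw [show groupRuns (a :: b :: P'')
            = (match groupRuns (b :: P'') with
               | (b' :: g') :: gs' => if b' = a + 1 then (a :: b' :: g') :: gs' else [a] :: (b' :: g') :: gs'
               | gs' => [a] :: gs') from rfl, hg₂]
      by_cases hk : b = a + 1
      · have hc : ((c : Int), a).1 - ((c : Int), a).2 = ((c + 1 : Int), b).1 - ((c + 1 : Int), b).2 := by
          show (c : Int) - a = (c + 1 : Int) - b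
          omega
        dsimp only
        rw [if_pos hc, if_pos hk]
        simp [hgg, hgs]
      · have hc : ¬ (((c : Int), a).1 - ((c : Int), a).2 = ((c + 1 : Int), b).1 - ((c + 1 : Int), b).2) := by
          show ¬ ((c : Int) - a = (c + 1 : Int) - b)
          omega
        dsimp only
        rw [if_neg hc, if_neg hk]
        simp [hgg, hgs]

theorem posFrom_head (v : List Int) : ∀ (n p : Int) (l : List Int), posFrom n v = p :: l → n ≤ p := by
  induction v with
  | nil => intro n p l h; simp [posFrom] at h
  | cons x r ih =>
    intro n p l h
    by_cases hx : x > 0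
    · simp [posFrom, hx] at h
      omega
    · simp [posFrom, hx] at h
      have := ih (n + 1) p l h
      omega

theorem getLastD_cons' (a d : Int) (g : List Int) : (a :: g).getLast?.getD d = g.getLast?.getD a := by
  cases g with
  | nil => simp
  | cons b t =>
    rw [List.getLast?_cons_cons]
    rcases h : (b :: t).getLast? with _ | v
    · exact absurd (List.getLast?_eq_none_iff.mp h) (by simp)
    · simp

theorem main_combined (v : List Int) : ∀ (n : Int),
    Ev (groupRuns (posFrom n v)) = scanRuns v n none
    ∧ ∀ s : Int, scanRuns v n (some s) = mergeHead s n (groupRuns (posFrom n v)) := by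
  induction v with
  | nil =>
    intro n
    constructor
    · simp [posFrom, groupRuns, Ev, scanRuns]
    · intro s; simp [posFrom, groupRuns, Ev, mergeHead, scanRuns]
  | cons x rest ih =>
    intro n
    obtain ⟨ihm, ihp⟩ := ih (n + 1)
    by_cases hx : x > 0
    · constructor
      · -- main, x > 0
        rw [show posFrom n (x :: rest) = n :: posFrom (n + 1) rest by simp [posFrom, hx]]
        rw [show scanRuns (x :: rest) n none = scanRuns rest (n + 1) (some n) by simp [scanRuns, hx]]
        rw [ihp n]
        rcases hp : posFrom (n + 1) rest with _ | ⟨q, l⟩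
        · simp [groupRuns, Ev, mergeHead, List.getLastD]
        · obtain ⟨g, gs, hg⟩ := groupRuns_shape q l
          rw [show groupRuns (n :: q :: l) = (match groupRuns (q :: l) with
            | (b :: g) :: gs => if b = n + 1 then (n :: b :: g) :: gs else [n] :: (b :: g) :: gs
            | gs => [n] :: gs) from rfl, hg]
          by_cases hq : q = n + 1
          · simp [hq, mergeHead, Ev, getLastD_cons']
          · simp [hq, mergeHead, Ev, List.getLastD]
      · -- pending, x > 0
        intro s
        rw [show scanRuns (x :: rest) n (some s) = scanRuns rest (n + 1) (some s) by simp [scanRuns, hx]]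
        rw [ihp s]
        rw [show posFrom n (x :: rest) = n :: posFrom (n + 1) rest by simp [posFrom, hx]]
        rcases hp : posFrom (n + 1) rest with _ | ⟨q, l⟩
        · simp [groupRuns, Ev, mergeHead, List.getLastD]
        · obtain ⟨g, gs, hg⟩ := groupRuns_shape q l
          rw [show groupRuns (n :: q :: l) = (match groupRuns (q :: l) with
            | (b :: g) :: gs => if b = n + 1 then (n :: b :: g) :: gs else [n] :: (b :: g) :: gs
            | gs => [n] :: gs) from rfl, hg]
          by_cases hq : q = n + 1
          · simp [hq, mergeHead, Ev, getLastD_cons']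
          · simp [hq, mergeHead, Ev, List.getLastD]
    · constructor
      · -- main, x ≤ 0
        rw [show posFrom n (x :: rest) = posFrom (n + 1) rest by simp [posFrom, hx]]
        rw [show scanRuns (x :: rest) n none = scanRuns rest (n + 1) none by simp [scanRuns, hx]]
        exact ihm
      · -- pending, x ≤ 0
        intro s
        rw [show scanRuns (x :: rest) n (some s) = (s, n) :: scanRuns rest (n + 1) none by
          simp [scanRuns, hx]]
        rw [show posFrom n (x :: rest) = posFrom (n + 1) rest by simp [posFrom, hx], ← ihm]
        rcases hp : posFrom (n + 1) rest with _ | ⟨q, l⟩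
        · simp [groupRuns, Ev, mergeHead]
        · obtain ⟨g, gs, hg⟩ := groupRuns_shape q l
          have hq : ¬ (q = n) := by
            have := posFrom_head rest (n + 1) q l hp
            omega
          rw [hg]
          simp [mergeHead, hq]

theorem ports_agree (v : List Int) :
    ((pyGroupbyA (PySem.List.enumerate
        ((PySem.List.enumerate v).filterMap (fun p => if p.2 > 0 then some p.1 else none)))).map
      (fun g =>
        let cur_cut := g.map Prod.snd
        (cur_cut.headD 0, cur_cut.getLastD 0))).map (fun p => (p.1, p.2 + 1))
    = scanRuns v 0 none := by
  rw [posFrom_eq v 0]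
  have h := groupby_eq_groupRuns (posFrom 0 v) 0
  calc ((pyGroupbyA (PySem.List.enumerate (posFrom 0 v))).map
          (fun g =>
            let cur_cut := g.map Prod.snd
            (cur_cut.headD 0, cur_cut.getLastD 0))).map (fun p => (p.1, p.2 + 1))
      = ((pyGroupbyA (PySem.List.enumerate (posFrom 0 v))).map (List.map Prod.snd)).map
          (fun h => (h.headD 0, h.getLastD 0 + 1)) := by
        simp [List.map_map, Function.comp]
    _ = Ev (groupRuns (posFrom 0 v)) := by rw [h]; rfl
    _ = scanRuns v 0 none := (main_combined v 0).1

-- ===== VERDICT (by name: the statement is the Claim_ definition above) =====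
theorem convert_vector_to_events_spec : Claim_equal_convert_vector_to_events := by
  intro vector _
  unfold Spec_convert_vector_to_events convert_vector_to_events convert_vector_to_events_alt
  exact ports_agree (vector.getD [0, 1, 1, 0, 0, 1, 0])
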